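-- pv_equiv track=rewrite | github.com/Kmaralla/daily-email-brief | src/utils/categories.py | categorize_sender
-- ===== SOURCE A (Python) =====
-- def categorize_sender(sender: str, subject: str) -> str:
--     """Categorize sender based on email content and sender name."""
--     sender_lower = (sender or '').lower()
--     subject_lower = (subject or '').lower()
--
--     if any(w in sender_lower for w in ['newsletter', 'digest', 'news', 'update', 'substack', 'medium']):
--         return 'Newsletters'
--     if any(w in sender_lower or w in subject_lower for w in ['promo', 'sale', 'deal', 'offer', 'discount', 'coupon', '$', 'fare', 'airline', 'hotel', 'booking']):
--         return 'Promotions'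
--     if any(w in sender_lower for w in ['hospital', 'clinic', 'medical', 'health', 'doctor', 'pharmacy', 'appointment']):
--         return 'Healthcare'
--     if any(w in sender_lower for w in ['bank', 'credit', 'payment', 'invoice', 'billing', 'paypal', 'stripe', 'financial']):
--         return 'Financial'
--     if any(w in sender_lower for w in ['linkedin', 'twitter', 'facebook', 'instagram', 'social']):
--         return 'Social Media'
--     if any(w in sender_lower for w in ['job', 'career', 'recruiter', 'hiring', 'interview', 'application']):
--         return 'Work/Jobs'
--     if any(w in subject_lower for w in ['security', 'alert', 'login', 'password', 'verify', 'suspicious']):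
--         return 'Security Alerts'
--     if any(w in sender_lower for w in ['amazon', 'ebay', 'shop', 'store', 'retail', 'delivery', 'shipping']):
--         return 'Shopping'
--     if any(w in sender_lower for w in ['github', 'stackoverflow', 'tech', 'software', 'developer', 'code']):
--         return 'Technology'
--     if any(w in sender_lower for w in ['university', 'school', 'course', 'education', 'learning', 'coursera', 'udemy']):
--         return 'Education'
--     if any(w in sender_lower for w in ['travel', 'trip', 'flight', 'airline', 'hotel', 'booking', 'expedia']):
--         return 'Travel'
--     if any(w in sender_lower for w in ['noreply', 'no-reply', 'notification', 'alert', 'reminder']):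
--         return 'Notifications'
--
--     return 'Other'
-- ===== SOURCE B (Python) =====
-- # Inverted keyword index + argmin: flatten all (priority, field, keyword) entries,
-- # scan them all once collecting the priorities of every match (no per-category
-- # loop, no early return), and return the name of the minimal matched priority.
--
-- _TABLE = [
--     ('Newsletters', (False,), ('newsletter', 'digest', 'news', 'update', 'substack', 'medium')),
--     ('Promotions', (False, True), ('promo', 'sale', 'deal', 'offer', 'discount', 'coupon', '$', 'fare', 'airline', 'hotel', 'booking')),
--     ('Healthcare', (False,), ('hospital', 'clinic', 'medical', 'health', 'doctor', 'pharmacy', 'appointment')),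
--     ('Financial', (False,), ('bank', 'credit', 'payment', 'invoice', 'billing', 'paypal', 'stripe', 'financial')),
--     ('Social Media', (False,), ('linkedin', 'twitter', 'facebook', 'instagram', 'social')),
--     ('Work/Jobs', (False,), ('job', 'career', 'recruiter', 'hiring', 'interview', 'application')),
--     ('Security Alerts', (True,), ('security', 'alert', 'login', 'password', 'verify', 'suspicious')),
--     ('Shopping', (False,), ('amazon', 'ebay', 'shop', 'store', 'retail', 'delivery', 'shipping')),
--     ('Technology', (False,), ('github', 'stackoverflow', 'tech', 'software', 'developer', 'code')),
--     ('Education', (False,), ('university', 'school', 'course', 'education', 'learning', 'coursera', 'udemy')),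
--     ('Travel', (False,), ('travel', 'trip', 'flight', 'airline', 'hotel', 'booking', 'expedia')),
--     ('Notifications', (False,), ('noreply', 'no-reply', 'notification', 'alert', 'reminder')),
-- ]
--
-- _NAMES = [name for name, _, _ in _TABLE]
--
-- # flat inverted index: one entry per (keyword, field) pair, tagged with its category's priority
-- _ENTRIES = [
--     (p, use_subject, w)
--     for p, (_, fields, words) in enumerate(_TABLE)
--     for w in words
--     for use_subject in fields
-- ]
--
--
-- def categorize_sender(sender: str, subject: str) -> str:
--     sender_lower = (sender or '').lower()
--     subject_lower = (subject or '').lower()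
--     matched = [
--         p for p, use_subject, w in _ENTRIES
--         if w in (subject_lower if use_subject else sender_lower)
--     ]
--     return _NAMES[min(matched)] if matched else 'Other'
-- ===== Notes on version B (the rewrite author's own statement) =====
-- stated objective: alternative
-- what changed: Replaces the ordered if-chain with early return by a flat inverted keyword index ((priority, field, keyword) entries) scanned in full, collecting every matching entry's priority and returning the name of the minimal one (argmin), 'Other' when nothing matches.
import Mathlib
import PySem

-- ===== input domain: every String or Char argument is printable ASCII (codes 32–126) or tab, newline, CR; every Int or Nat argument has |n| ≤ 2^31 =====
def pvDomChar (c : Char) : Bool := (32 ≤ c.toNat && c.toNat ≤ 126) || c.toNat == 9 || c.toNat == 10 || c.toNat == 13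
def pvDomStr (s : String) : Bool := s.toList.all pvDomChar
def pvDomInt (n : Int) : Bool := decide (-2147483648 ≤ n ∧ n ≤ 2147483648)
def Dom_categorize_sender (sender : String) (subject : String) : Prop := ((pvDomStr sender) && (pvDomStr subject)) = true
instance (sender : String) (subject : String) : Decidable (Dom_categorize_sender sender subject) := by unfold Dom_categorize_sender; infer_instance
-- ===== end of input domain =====

-- B replaces A's ordered if-chain by a flat inverted keyword index scanned in full, returning the category of minimal matched priority (alternative decomposition, same cost).


-- ===== PORT A =====
def categorize_sender (sender : String) (subject : String) : String :=
  -- (sender or '').lower(): for strings, `x or ''` is `x` unless x = "" (then ''), so: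
  let sender_lower := PySem.Str.lower (if sender == "" then "" else sender)
  let subject_lower := PySem.Str.lower (if subject == "" then "" else subject)
  if (["newsletter", "digest", "news", "update", "substack", "medium"].any
      (fun w => PySem.Str.isIn w sender_lower)) then "Newsletters"
  else if (["promo", "sale", "deal", "offer", "discount", "coupon", "$", "fare", "airline", "hotel", "booking"].any
      (fun w => PySem.Str.isIn w sender_lower || PySem.Str.isIn w subject_lower)) then "Promotions"
  else if (["hospital", "clinic", "medical", "health", "doctor", "pharmacy", "appointment"].any
      (fun w => PySem.Str.isIn w sender_lower)) then "Healthcare"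
  else if (["bank", "credit", "payment", "invoice", "billing", "paypal", "stripe", "financial"].any
      (fun w => PySem.Str.isIn w sender_lower)) then "Financial"
  else if (["linkedin", "twitter", "facebook", "instagram", "social"].any
      (fun w => PySem.Str.isIn w sender_lower)) then "Social Media"
  else if (["job", "career", "recruiter", "hiring", "interview", "application"].any
      (fun w => PySem.Str.isIn w sender_lower)) then "Work/Jobs"
  else if (["security", "alert", "login", "password", "verify", "suspicious"].any
      (fun w => PySem.Str.isIn w subject_lower)) then "Security Alerts"
  else if (["amazon", "ebay", "shop", "store", "retail", "delivery", "shipping"].any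
      (fun w => PySem.Str.isIn w sender_lower)) then "Shopping"
  else if (["github", "stackoverflow", "tech", "software", "developer", "code"].any
      (fun w => PySem.Str.isIn w sender_lower)) then "Technology"
  else if (["university", "school", "course", "education", "learning", "coursera", "udemy"].any
      (fun w => PySem.Str.isIn w sender_lower)) then "Education"
  else if (["travel", "trip", "flight", "airline", "hotel", "booking", "expedia"].any
      (fun w => PySem.Str.isIn w sender_lower)) then "Travel"
  else if (["noreply", "no-reply", "notification", "alert", "reminder"].any
      (fun w => PySem.Str.isIn w sender_lower)) then "Notifications"
  else "Other"

-- ===== PORT B =====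
-- Source B's _TABLE: (name, field flags (true = search subject), keywords); priority = position
def pvTable : List (String × List Bool × List String) :=
  [ ("Newsletters", [false], ["newsletter", "digest", "news", "update", "substack", "medium"]),
    ("Promotions", [false, true], ["promo", "sale", "deal", "offer", "discount", "coupon", "$", "fare", "airline", "hotel", "booking"]),
    ("Healthcare", [false], ["hospital", "clinic", "medical", "health", "doctor", "pharmacy", "appointment"]),
    ("Financial", [false], ["bank", "credit", "payment", "invoice", "billing", "paypal", "stripe", "financial"]),
    ("Social Media", [false], ["linkedin", "twitter", "facebook", "instagram", "social"]),
    ("Work/Jobs", [false], ["job", "career", "recruiter", "hiring", "interview", "application"]),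
    ("Security Alerts", [true], ["security", "alert", "login", "password", "verify", "suspicious"]),
    ("Shopping", [false], ["amazon", "ebay", "shop", "store", "retail", "delivery", "shipping"]),
    ("Technology", [false], ["github", "stackoverflow", "tech", "software", "developer", "code"]),
    ("Education", [false], ["university", "school", "course", "education", "learning", "coursera", "udemy"]),
    ("Travel", [false], ["travel", "trip", "flight", "airline", "hotel", "booking", "expedia"]),
    ("Notifications", [false], ["noreply", "no-reply", "notification", "alert", "reminder"]) ]

-- Source B's _NAMES
def pvNames : List String := pvTable.map (fun r => r.1)

-- Source B's _ENTRIES: flat inverted index [(priority, use_subject, keyword), …]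
def pvEntries : List (Int × Bool × String) :=
  (PySem.List.enumerate pvTable 0).flatMap
    (fun pr => pr.2.2.2.flatMap (fun w => pr.2.2.1.map (fun f => (pr.1, f, w))))

def categorize_sender_alt (sender : String) (subject : String) : String :=
  let sender_lower := PySem.Str.lower (if sender == "" then "" else sender)
  let subject_lower := PySem.Str.lower (if subject == "" then "" else subject)
  let matched := (pvEntries.filter
      (fun e => PySem.Str.isIn e.2.2 (if e.2.1 then subject_lower else sender_lower))).map (fun e => e.1)
  -- `_NAMES[min(matched)] if matched else 'Other'`: min? is none exactly when matched is empty;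
  -- the index is always in range (0 ≤ m < 12), so the pyGet? fallback is never taken.
  match PySem.List.min? matched (fun p => p) with
  | none => "Other"
  | some m => (PySem.List.pyGet? pvNames m).getD "Other"

-- ===== PRECONDITION & SPEC =====
def Spec_categorize_sender (sender : String) (subject : String) (out : String) : Prop := out = categorize_sender_alt sender subject
instance (sender : String) (subject : String) (out : String) : Decidable (Spec_categorize_sender sender subject out) := by unfold Spec_categorize_sender; infer_instance

-- ===== CLAIM (what is proved, stated in full; the proofs are below) =====
def Claim_equal_categorize_sender : Prop := ∀ (sender : String) (subject : String), Dom_categorize_sender sender subject → Spec_categorize_sender sender subject (categorize_sender sender subject)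

-- ===== LEMMAS AND PROOFS =====

-- whether a table row matches (keyword-in-selected-field), and the first matching row's index
def pvRowMatch (sl jl : String) (r : String × List Bool × List String) : Bool :=
  r.2.2.any (fun w => r.2.1.any (fun f => PySem.Str.isIn w (if f then jl else sl)))

def pvFirst (sl jl : String) : Int → List (String × List Bool × List String) → Option Int
  | _, [] => none
  | k, r :: rs => if pvRowMatch sl jl r then some k else pvFirst sl jl (k + 1) rs

def pvMatched (sl jl : String) (t : List (String × List Bool × List String)) (k : Int) : List Int :=
  (((PySem.List.enumerate t k).flatMap
      (fun pr => pr.2.2.2.flatMap (fun w => pr.2.2.1.map (fun f => (pr.1, f, w))))).filter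
    (fun e => PySem.Str.isIn e.2.2 (if e.2.1 then jl else sl))).map (fun e => e.1)

theorem pvMatched_ge (sl jl : String) (t : List (String × List Bool × List String)) (k : Int) :
    ∀ x ∈ pvMatched sl jl t k, k ≤ x := by
  intro x hx
  simp only [pvMatched, List.mem_map, List.mem_filter, List.mem_flatMap,
    PySem.List.mem_enumerate_iff] at hx
  obtain ⟨e, ⟨⟨pr, ⟨⟨j, hj, hpr⟩, he⟩⟩, _⟩, hx⟩ := hx
  subst hpr
  obtain ⟨w, _, f, _, he⟩ := he
  subst he; subst hx; simp

theorem pvMatched_min (sl jl : String) (t : List (String × List Bool × List String)) (k : Int) :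
    PySem.List.min? (pvMatched sl jl t k) (fun p => p) = pvFirst sl jl k t := by
  induction t generalizing k with
  | nil =>
    simp [pvMatched, pvFirst, PySem.List.enumerate_nil]
  | cons r rs ih =>
    have hsplit : pvMatched sl jl (r :: rs) k =
        (((r.2.2.flatMap (fun w => r.2.1.map (fun f => ((k : Int), f, w)))).filter
          (fun e => PySem.Str.isIn e.2.2 (if e.2.1 then jl else sl))).map (fun e => e.1))
        ++ pvMatched sl jl rs (k + 1) := by
      simp [pvMatched, PySem.List.enumerate_cons, List.filter_append, List.map_append]
    by_cases hm : pvRowMatch sl jl r = true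
    · -- the head row matches: k is in the list and is a lower bound, so min? = some k
      set L := (((r.2.2.flatMap (fun w => r.2.1.map (fun f => ((k : Int), f, w)))).filter
          (fun e => PySem.Str.isIn e.2.2 (if e.2.1 then jl else sl))).map (fun e => e.1)) with hL
      have hmemL : (k : Int) ∈ L := by
        simp only [pvRowMatch, List.any_eq_true] at hm
        obtain ⟨w, hw, f, hf, hin⟩ := hm
        simp only [hL, List.mem_map, List.mem_filter, List.mem_flatMap, List.mem_map]
        exact ⟨(k, f, w), ⟨⟨w, hw, f, hf, rfl⟩, hin⟩, rfl⟩
      have hallL : ∀ x ∈ L, x = (k : Int) := by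
        intro x hx
        simp only [hL, List.mem_map, List.mem_filter, List.mem_flatMap, List.mem_map] at hx
        obtain ⟨e, ⟨⟨w, _, f, _, he⟩, _⟩, hx⟩ := hx
        subst he; exact hx.symm
      have hnonempty : pvMatched sl jl (r :: rs) k ≠ [] := by
        rw [hsplit]; intro h
        rcases List.append_eq_nil_iff.mp h with ⟨h1, _⟩
        rw [h1] at hmemL; exact absurd hmemL (List.not_mem_nil)
      obtain ⟨m, hmm⟩ : ∃ m, PySem.List.min? (pvMatched sl jl (r :: rs) k) (fun p => p) = some m := by
        cases hc : PySem.List.min? (pvMatched sl jl (r :: rs) k) (fun p => p) with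
        | none => exact absurd ((PySem.List.min?_eq_none_iff _ _).mp hc) hnonempty
        | some m => exact ⟨m, rfl⟩
      have hmmem := PySem.List.min?_mem hmm
      have hmin := PySem.List.min?_isMin hmm
      have hkm : k ≤ m := by
        rw [hsplit] at hmmem
        rcases List.mem_append.mp hmmem with h | h
        · exact le_of_eq (hallL m h).symm
        · have := pvMatched_ge sl jl rs (k + 1) m h; omega
      have hmk : m ≤ k := by
        apply hmin
        rw [hsplit]; exact List.mem_append.mpr (Or.inl hmemL)
      rw [hmm, pvFirst, if_pos hm]
      congr 1; omega
    · -- the head row does not match: its entries all filter away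
      have hLnil : (((r.2.2.flatMap (fun w => r.2.1.map (fun f => ((k : Int), f, w)))).filter
          (fun e => PySem.Str.isIn e.2.2 (if e.2.1 then jl else sl))).map (fun e => e.1)) = [] := by
        rw [List.map_eq_nil_iff, List.filter_eq_nil_iff]
        intro e he
        simp only [List.mem_flatMap, List.mem_map] at he
        obtain ⟨w, hw, f, hf, he⟩ := he
        subst he
        simp only [pvRowMatch, List.any_eq_true] at hm
        push Not at hm
        simpa using hm w hw f hf
      rw [hsplit, hLnil, List.nil_append, ih, pvFirst, if_neg hm]

-- ===== VERDICT (by name: the statement is the Claim_ definition above) =====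
theorem categorize_sender_spec : Claim_equal_categorize_sender := by
  intro sender subject _
  unfold Spec_categorize_sender categorize_sender categorize_sender_alt
  generalize PySem.Str.lower (if sender == "" then "" else sender) = sl
  generalize PySem.Str.lower (if subject == "" then "" else subject) = jl
  have hB : (pvEntries.filter
      (fun e => PySem.Str.isIn e.2.2 (if e.2.1 then jl else sl))).map (fun e => e.1)
      = pvMatched sl jl pvTable 0 := rfl
  simp only [hB]
  rw [pvMatched_min]
  simp only [pvTable, pvFirst, pvRowMatch, List.any_cons, List.any_nil, Bool.or_false,
    Bool.false_eq_true, if_true, if_false]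
  simp only [apply_ite (fun o : Option Int => match o with
    | none => "Other"
    | some m => (PySem.List.pyGet? pvNames m).getD "Other")]
  have g0 : (PySem.List.pyGet? pvNames 0).getD "Other" = "Newsletters" := by decide
  have g1 : (PySem.List.pyGet? pvNames (0 + 1)).getD "Other" = "Promotions" := by decide
  have g2 : (PySem.List.pyGet? pvNames (0 + 1 + 1)).getD "Other" = "Healthcare" := by decide
  have g3 : (PySem.List.pyGet? pvNames (0 + 1 + 1 + 1)).getD "Other" = "Financial" := by decide
  have g4 : (PySem.List.pyGet? pvNames (0 + 1 + 1 + 1 + 1)).getD "Other" = "Social Media" := by decide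
  have g5 : (PySem.List.pyGet? pvNames (0 + 1 + 1 + 1 + 1 + 1)).getD "Other" = "Work/Jobs" := by decide
  have g6 : (PySem.List.pyGet? pvNames (0 + 1 + 1 + 1 + 1 + 1 + 1)).getD "Other" = "Security Alerts" := by decide
  have g7 : (PySem.List.pyGet? pvNames (0 + 1 + 1 + 1 + 1 + 1 + 1 + 1)).getD "Other" = "Shopping" := by decide
  have g8 : (PySem.List.pyGet? pvNames (0 + 1 + 1 + 1 + 1 + 1 + 1 + 1 + 1)).getD "Other" = "Technology" := by decide
  have g9 : (PySem.List.pyGet? pvNames (0 + 1 + 1 + 1 + 1 + 1 + 1 + 1 + 1 + 1)).getD "Other" = "Education" := by decide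
  have g10 : (PySem.List.pyGet? pvNames (0 + 1 + 1 + 1 + 1 + 1 + 1 + 1 + 1 + 1 + 1)).getD "Other" = "Travel" := by decide
  have g11 : (PySem.List.pyGet? pvNames (0 + 1 + 1 + 1 + 1 + 1 + 1 + 1 + 1 + 1 + 1 + 1)).getD "Other" = "Notifications" := by decide
  simp only [g0, g1, g2, g3, g4, g5, g6, g7, g8, g9, g10, g11]
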